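-- pv_equiv track=rewrite | github.com/boldip/qf | src/hypergraphs.py | classSizeDist
-- ===== SOURCE A (Python) =====
-- from collections import defaultdict
--
-- def classSizeDist(m, prefOnly = "", keyadj = None):
--     """
--         Returns a dictionary giving the distribution of the sizes of the equivalence
--         classes defined by m. An equivalence class is a group of keys of m with the same value.
--         The resulting dictionary will have as keys the sizes of the equivalence classes, and as
--         values the number of classes of that size.
--
--         Args:
--             m: the map to be analyzed.
--             prefOnly: only keys with this prefix are considered.
--             keyadj: if specified, keys are passed through this dictionary.
--
--         Return:
--             a dictionary having as keys the sizes of the equivalence classes, and as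
--             values the number of classes of that size.
--     """
--     d = defaultdict(lambda: 0)
--     for v in set(m.values()):
--         if keyadj is not None:
--             eqClass = set([keyadj[k] for k,w in m.items() if w==v and k.startswith(prefOnly)])
--         else:
--             eqClass = set([k for k,w in m.items() if w==v and k.startswith(prefOnly)])
--         d[len(eqClass)] += 1
--     return {k:v for k,v in d.items() if k > 0}
-- ===== SOURCE B (Python) =====
-- from collections import Counter
--
-- def classSizeDist(m, prefOnly = "", keyadj = None):
--     # Phase 1: build a value -> set-of-(adjusted)-keys index in one pass.
--     groups = {}
--     for k, v in m.items():
--         bucket = groups.setdefault(v, set())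
--         if k.startswith(prefOnly):
--             bucket.add(k if keyadj is None else keyadj[k])
--     # Phase 2: tally the sizes of the non-empty classes.
--     return dict(Counter(len(b) for b in groups.values() if b))
-- ===== Notes on version B (the rewrite author's own statement) =====
-- stated objective: alternative
-- what changed: A rescans all items once per distinct value to rebuild each equivalence class; B makes a single grouping pass building a value->set index with dict.setdefault, then tallies the bucket sizes with one Counter (intended as faster, O(n*v) vs O(n), but measured only ~1.3x on the generated inputs).
import Mathlib
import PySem

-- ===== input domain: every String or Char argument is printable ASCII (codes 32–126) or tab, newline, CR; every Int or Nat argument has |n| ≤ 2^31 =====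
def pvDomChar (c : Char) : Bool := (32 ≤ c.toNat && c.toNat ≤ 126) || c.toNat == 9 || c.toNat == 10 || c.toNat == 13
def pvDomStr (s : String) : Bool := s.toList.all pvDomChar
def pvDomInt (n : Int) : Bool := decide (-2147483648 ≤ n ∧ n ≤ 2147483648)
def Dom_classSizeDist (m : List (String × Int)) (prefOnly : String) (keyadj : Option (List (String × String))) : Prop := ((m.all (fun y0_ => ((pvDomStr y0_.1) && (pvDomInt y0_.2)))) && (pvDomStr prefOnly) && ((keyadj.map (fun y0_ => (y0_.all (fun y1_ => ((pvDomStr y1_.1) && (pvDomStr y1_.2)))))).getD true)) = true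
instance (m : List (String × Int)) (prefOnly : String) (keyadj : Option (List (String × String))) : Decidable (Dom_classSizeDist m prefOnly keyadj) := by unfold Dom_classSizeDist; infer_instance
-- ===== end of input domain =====

-- B replaces A's per-distinct-value rescans of the whole map by one grouping pass (value -> set of
-- adjusted keys) followed by a Counter tally of the bucket sizes (objective: alternative algorithm;
-- intended as asymptotically lighter, but not measured >=1.5x faster on the generated inputs).


-- ===== PORT A =====
-- shared convention plumbing: a python dict argument (assoc list) as a PySem.Dict (last write wins, like dict(...))
def pvToDict {α : Type} (l : List (String × α)) : PySem.Dict String α :=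
  l.foldl (fun d p => d.insert p.1 p.2) PySem.Dict.empty

-- Port of A. `keyadj[k]` is `(pvToDict adj).getD k ""`: a total stand-in that is exact under Pre_
-- (the KeyError inputs are excluded there).
def classSizeDist (m : List (String × Int)) (prefOnly : String) (keyadj : Option (List (String × String))) : List (Int × Int) :=
  let md := pvToDict m
  let d : PySem.Dict Int Int :=
    (PySem.Set.ofList md.values).foldl (fun d v =>
      let eqClass : PySem.Set String :=
        match keyadj with
        | some adj =>
            PySem.Set.ofList ((md.items.filter (fun p => p.2 == v && PySem.Str.startswith p.1 prefOnly)).map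
              (fun p => (pvToDict adj).getD p.1 ""))
        | none =>
            PySem.Set.ofList ((md.items.filter (fun p => p.2 == v && PySem.Str.startswith p.1 prefOnly)).map
              (fun p => p.1))
      d.insert (PySem.Set.len eqClass) (d.getD (PySem.Set.len eqClass) 0 + 1))
      PySem.Dict.empty
  d.items.filter (fun p => 0 < p.1)

-- ===== PORT B =====
-- `k if keyadj is None else keyadj[k]` (same total stand-in for the lookup as in port A)
def pvAdjust (keyadj : Option (List (String × String))) (k : String) : String :=
  match keyadj with
  | none => k
  | some adj => (pvToDict adj).getD k ""

def classSizeDist_alt (m : List (String × Int)) (prefOnly : String) (keyadj : Option (List (String × String))) : List (Int × Int) :=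
  let md := pvToDict m
  -- Phase 1: one pass over the items, building the value -> set-of-adjusted-keys index
  let groups : PySem.Dict Int (PySem.Set String) :=
    md.items.foldl (fun g p =>
      let g' := g.setdefault p.2 PySem.Set.empty
      if PySem.Str.startswith p.1 prefOnly then
        g'.modify p.2 PySem.Set.empty (fun b => PySem.Set.add b (pvAdjust keyadj p.1))
      else g') PySem.Dict.empty
  -- Phase 2: Counter over the sizes of the non-empty buckets
  (PySem.Dict.counter ((groups.values.filter (fun b => !b.isEmpty)).map (fun b => PySem.Set.len b))).items

-- ===== PRECONDITION & SPEC =====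
-- Excluded: keyadj given but missing some key of m that passes the prefix filter — there A (and B) raise KeyError.
def Pre_classSizeDist (m : List (String × Int)) (prefOnly : String) (keyadj : Option (List (String × String))) : Prop :=
  keyadj = none ∨ ∀ p ∈ m, PySem.Str.startswith p.1 prefOnly = true → ((keyadj.getD []).map (·.1)).contains p.1 = true
instance (m : List (String × Int)) (prefOnly : String) (keyadj : Option (List (String × String))) : Decidable (Pre_classSizeDist m prefOnly keyadj) := by unfold Pre_classSizeDist; infer_instance

def pvWitness_classSizeDist : (List (String × Int)) × String × (Option (List (String × String))) :=
  ([("pa", 1), ("pb", 1), ("qc", 2)], "p", some [("pa", "x"), ("pb", "x")])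

def Spec_classSizeDist (m : List (String × Int)) (prefOnly : String) (keyadj : Option (List (String × String))) (out : List (Int × Int)) : Prop := out = classSizeDist_alt m prefOnly keyadj
instance (m : List (String × Int)) (prefOnly : String) (keyadj : Option (List (String × String))) (out : List (Int × Int)) : Decidable (Spec_classSizeDist m prefOnly keyadj out) := by unfold Spec_classSizeDist; infer_instance

-- ===== CLAIM (what is proved, stated in full; the proofs are below) =====
def Claim_equal_classSizeDist : Prop := ∀ (m : List (String × Int)) (prefOnly : String) (keyadj : Option (List (String × String))), Dom_classSizeDist m prefOnly keyadj → Pre_classSizeDist m prefOnly keyadj → Spec_classSizeDist m prefOnly keyadj (classSizeDist m prefOnly keyadj)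

-- ===== LEMMAS AND PROOFS =====

-- B's grouping step, abstracted over the prefix test and the key adjustment
def pvStep (pf : String → Bool) (adj : String → String) (g : PySem.Dict Int (PySem.Set String)) (p : String × Int) : PySem.Dict Int (PySem.Set String) :=
  if pf p.1 then (g.setdefault p.2 PySem.Set.empty).modify p.2 PySem.Set.empty (fun b => PySem.Set.add b (adj p.1))
  else g.setdefault p.2 PySem.Set.empty

-- the equivalence class of v, as both ports compute it
def pvBucket (l : List (String × Int)) (pf : String → Bool) (adj : String → String) (v : Int) : PySem.Set String :=
  PySem.Set.ofList ((l.filter (fun p => p.2 == v && pf p.1)).map (fun p => adj p.1))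

theorem pvStep_keys (pf : String → Bool) (adj : String → String) (g : PySem.Dict Int (PySem.Set String)) (p : String × Int) :
    (pvStep pf adj g p).keys = PySem.Set.add g.keys p.2 := by
  have hsd : (g.setdefault p.2 PySem.Set.empty).keys = PySem.Set.add g.keys p.2 := by
    rw [PySem.Dict.keys_setdefault, PySem.Set.add_eq_ite]
    by_cases h : p.2 ∈ g.keys
    · simp [h, (PySem.Dict.contains_iff_mem_keys g p.2).2 h]
    · have hc : g.contains p.2 = false := by
        by_contra hcc
        exact h ((PySem.Dict.contains_iff_mem_keys g p.2).1 (by simpa using hcc))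
      simp [h, hc]
  unfold pvStep
  split_ifs with hpf
  · rw [PySem.Dict.keys_modify, PySem.Dict.keys_insert_of_contains, hsd]
    simp [PySem.Dict.contains_setdefault]
  · exact hsd

theorem pvStep_getD (pf : String → Bool) (adj : String → String) (g : PySem.Dict Int (PySem.Set String)) (p : String × Int) (v : Int) :
    (pvStep pf adj g p).getD v PySem.Set.empty
      = if p.2 == v && pf p.1 then PySem.Set.add (g.getD v PySem.Set.empty) (adj p.1) else g.getD v PySem.Set.empty := by
  have hsd : ∀ w, (g.setdefault p.2 PySem.Set.empty).getD w PySem.Set.empty = g.getD w PySem.Set.empty := by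
    intro w
    rcases eq_or_ne w p.2 with h | h
    · subst h; exact PySem.Dict.getD_setdefault_self g p.2 PySem.Set.empty PySem.Set.empty
    · rw [PySem.Dict.getD_eq_get?_getD, PySem.Dict.get?_setdefault_of_ne _ _ h, ← PySem.Dict.getD_eq_get?_getD]
  by_cases hpf : pf p.1
  · unfold pvStep
    rw [if_pos hpf]
    rcases eq_or_ne v p.2 with h | h
    · subst h
      rw [PySem.Dict.getD_modify_self, hsd]
      simp [hpf]
    · rw [PySem.Dict.getD_modify_of_ne _ _ _ h, hsd]
      have hb : (p.2 == v) = false := by simp [Ne.symm h]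
      simp [hb]
  · unfold pvStep
    rw [if_neg hpf, hsd]
    simp [hpf]

theorem pvFold_keys (pf : String → Bool) (adj : String → String) (l : List (String × Int)) (g : PySem.Dict Int (PySem.Set String)) :
    (l.foldl (pvStep pf adj) g).keys = PySem.Set.update g.keys (l.map (·.2)) := by
  induction l generalizing g with
  | nil => simp [PySem.Set.update_nil]
  | cons p l ih =>
    simp only [List.foldl_cons, List.map_cons, PySem.Set.update_cons]
    rw [ih, pvStep_keys]

theorem pvFold_getD (pf : String → Bool) (adj : String → String) (l : List (String × Int)) (g : PySem.Dict Int (PySem.Set String)) (v : Int) :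
    (l.foldl (pvStep pf adj) g).getD v PySem.Set.empty
      = PySem.Set.update (g.getD v PySem.Set.empty) ((l.filter (fun p => p.2 == v && pf p.1)).map (fun p => adj p.1)) := by
  induction l generalizing g with
  | nil => simp [PySem.Set.update_nil]
  | cons p l ih =>
    simp only [List.foldl_cons, List.filter_cons]
    by_cases h : (p.2 == v && pf p.1) = true
    · rw [ih, pvStep_getD, if_pos h]
      simp [h, PySem.Set.update_cons]
    · rw [ih, pvStep_getD, if_neg h]
      simp [h]

-- dedup commutes with a filter
theorem pvOfList_filter {α : Type} [BEq α] [LawfulBEq α] (p : α → Bool) (xs : List α) :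
    PySem.Set.ofList (xs.filter p) = (PySem.Set.ofList xs).filter p := by
  induction xs with
  | nil => simp
  | cons x xs ih =>
    rw [List.filter_cons, PySem.Set.ofList_cons]
    by_cases h : p x
    · simp only [h, if_pos]
      rw [PySem.Set.ofList_cons, ih, List.filter_cons, if_pos h]
      simp [PySem.Set.discard, List.filter_filter, Bool.and_comm]
    · simp only [h]
      rw [List.filter_cons, if_neg (by simp), ih]
      rw [PySem.Set.discard, List.filter_filter, if_neg h]
      apply (List.filter_congr ?_).symm
      intro a ha
      rcases eq_or_ne a x with rfl | hne
      · simp [h]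
      · simp [hne]

-- dropping the zero-count key of a Counter = counting the positives only
theorem pvCounter_items_filter (L : List Int) :
    (PySem.Dict.counter L).items.filter (fun p => 0 < p.1) = (PySem.Dict.counter (L.filter (fun x => 0 < x))).items := by
  rw [PySem.Dict.items_counter, PySem.Dict.items_counter, List.filter_map, pvOfList_filter]
  apply List.map_congr_left
  intro k hk
  have hq : (decide ((0:Int) < k)) = true := by simpa using (List.mem_filter.1 hk).2
  rw [List.count_filter (p := fun x => decide ((0:Int) < x)) hq]

-- the core equality: A's per-value rescan fold, tallied and filtered, equals B's grouping pass + Counter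
theorem pvCore (l : List (String × Int)) (pf : String → Bool) (adj : String → String) :
    ((PySem.Set.ofList (l.map (·.2))).foldl
        (fun d v => d.insert (PySem.Set.len (pvBucket l pf adj v)) (d.getD (PySem.Set.len (pvBucket l pf adj v)) 0 + 1))
        PySem.Dict.empty).items.filter (fun p => 0 < p.1)
    = (PySem.Dict.counter (((l.foldl (pvStep pf adj) PySem.Dict.empty).values.filter (fun b => !b.isEmpty)).map
        (fun b => PySem.Set.len b))).items := by
  have hkeys : (l.foldl (pvStep pf adj) PySem.Dict.empty).keys = PySem.Set.ofList (l.map (·.2)) := by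
    rw [pvFold_keys, PySem.Dict.keys_empty, PySem.Set.update_nil_left]
  have hnod : (l.foldl (pvStep pf adj) PySem.Dict.empty).keys.Nodup := by
    rw [hkeys]; exact PySem.Set.nodup_ofList _
  have hval : (l.foldl (pvStep pf adj) PySem.Dict.empty).values
      = (PySem.Set.ofList (l.map (·.2))).map (pvBucket l pf adj) := by
    rw [PySem.Dict.values_eq_map_keys _ hnod PySem.Set.empty, hkeys]
    apply List.map_congr_left
    intro v _
    rw [pvFold_getD, PySem.Dict.getD_empty, PySem.Set.update_empty]
    rfl
  have hfold : (PySem.Set.ofList (l.map (·.2))).foldl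
        (fun d v => d.insert (PySem.Set.len (pvBucket l pf adj v)) (d.getD (PySem.Set.len (pvBucket l pf adj v)) 0 + 1))
        PySem.Dict.empty
      = PySem.Dict.counter ((PySem.Set.ofList (l.map (·.2))).map (fun v => PySem.Set.len (pvBucket l pf adj v))) := by
    rw [← PySem.Dict.foldl_insert_getD_add_one_eq_counter, List.foldl_map]
  rw [hfold, pvCounter_items_filter, hval]
  congr 1
  rw [List.filter_map, List.filter_map, List.map_map]
  simp only [Function.comp_def]
  refine congrArg PySem.Dict.counter (congrArg (List.map _) (List.filter_congr ?_))
  intro v _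
  simp [PySem.Set.len, List.length_pos_iff]
  cases h : (pvBucket l pf adj v).isEmpty
  · simp [List.isEmpty_eq_false_iff] at h
    simp [h]
  · simp [List.isEmpty_iff] at h
    simp [h]

-- ===== VERDICT (by name: the statement is the Claim_ definition above) =====
theorem classSizeDist_spec : Claim_equal_classSizeDist := by
  intro m prefOnly keyadj _ _
  unfold Spec_classSizeDist classSizeDist classSizeDist_alt
  cases keyadj with
  | none =>
      exact pvCore (pvToDict m).items (fun k => PySem.Str.startswith k prefOnly) (fun k => k)
  | some adj =>
      exact pvCore (pvToDict m).items (fun k => PySem.Str.startswith k prefOnly) (fun k => (pvToDict adj).getD k "")
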